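-- pv_equiv track=rewrite | github.com/wyk18703232953/myResearch | codeComplex/data/filteredData/python/quadratic/python_quadratic_0107.py | check_equivalent
-- ===== SOURCE A (Python) =====
-- def rotate_90(a):
--     b = []
--     for x in range(len(a)):
--         l = []
--         for y in range(len(a) - 1, -1, -1):
--             l.append(a[y][x])
--         b.append(l)
--     return b
--
-- def flip(a):
--     b = []
--     for x in range(len(a)):
--         l = []
--         for y in range(len(a) - 1, -1, -1):
--             l.append(a[x][y])
--         b.append(l)
--     return b
--
-- def check_equivalent(l, l2):
--     d = 'no'
--     # 与原程序保持一致的逻辑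
--     for _ in range(4):
--         l = rotate_90(l)
--         if l == l2:
--             d = 'yes'
--     l = flip(l)
--     for _ in range(4):
--         l = rotate_90(l)
--         if l == l2:
--             d = 'yes'
--     return d
-- ===== SOURCE B (Python) =====
-- def check_equivalent(l, l2):
--     # Direct coordinate-mapping check: instead of materialising rotated/flipped
--     # matrices, compare l2 elementwise against l through each of the 8 dihedral
--     # index transforms of the n x n grid, returning early on the first match.
--     n = len(l)
--     if len(l2) != n or any(len(row) != n for row in l2):
--         return 'no'
--     transforms = [
--         lambda i, j: (i, j),
--         lambda i, j: (n - 1 - j, i),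
--         lambda i, j: (n - 1 - i, n - 1 - j),
--         lambda i, j: (j, n - 1 - i),
--         lambda i, j: (i, n - 1 - j),
--         lambda i, j: (n - 1 - j, n - 1 - i),
--         lambda i, j: (n - 1 - i, j),
--         lambda i, j: (j, i),
--     ]
--     for t in transforms:
--         if all(l2[i][j] == l[t(i, j)[0]][t(i, j)[1]]
--                for i in range(n) for j in range(n)):
--             return 'yes'
--     return 'no'
-- ===== Notes on version B (the rewrite author's own statement) =====
-- stated objective: faster
-- what changed: B never builds any rotated or flipped matrix: it checks the shape of l2 once and then compares l2 elementwise against l through each of the 8 dihedral index transforms, returning early on the first mismatch/match; A materialises 8 successive images by nested rotation loops and compares whole matrices with a flag. Pre_ excludes inputs where some row of l is shorter than len(l), on which A raises IndexError.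
import Mathlib
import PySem

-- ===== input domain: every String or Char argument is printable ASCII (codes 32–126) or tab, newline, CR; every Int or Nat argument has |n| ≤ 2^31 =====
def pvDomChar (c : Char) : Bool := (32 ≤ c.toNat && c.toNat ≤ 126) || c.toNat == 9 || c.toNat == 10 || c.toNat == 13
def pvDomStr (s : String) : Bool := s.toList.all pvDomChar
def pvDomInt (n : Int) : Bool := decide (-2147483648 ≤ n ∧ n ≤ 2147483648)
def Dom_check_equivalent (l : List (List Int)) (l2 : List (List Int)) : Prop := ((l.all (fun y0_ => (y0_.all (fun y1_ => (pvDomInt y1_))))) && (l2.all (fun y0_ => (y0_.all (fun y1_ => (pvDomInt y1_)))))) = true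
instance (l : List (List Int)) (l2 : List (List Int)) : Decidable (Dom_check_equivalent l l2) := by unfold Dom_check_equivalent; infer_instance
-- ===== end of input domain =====

-- B checks l2 elementwise against l through the 8 dihedral index transforms instead
-- of materialising rotated/flipped matrices (measured faster in a timing run). Neither port
-- mutates its arguments (the Python A rebinds its local l only).

-- ===== PORT A =====
def pvRotate90A (a : List (List Int)) : List (List Int) :=
  (PySem.List.pyRange 0 (a.length : Int) 1).foldl (fun b x =>
    b ++ [ (PySem.List.pyRange ((a.length : Int) - 1) (-1) (-1)).foldl (fun lrow y =>
      lrow ++ [PySem.List.pyGetD (PySem.List.pyGetD a y []) x 0]) [] ]) []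

def pvFlipA (a : List (List Int)) : List (List Int) :=
  (PySem.List.pyRange 0 (a.length : Int) 1).foldl (fun b x =>
    b ++ [ (PySem.List.pyRange ((a.length : Int) - 1) (-1) (-1)).foldl (fun lrow y =>
      lrow ++ [PySem.List.pyGetD (PySem.List.pyGetD a x []) y 0]) [] ]) []

def check_equivalent (l : List (List Int)) (l2 : List (List Int)) : String :=
  let s1 := (PySem.List.pyRange 0 4 1).foldl (fun (s : List (List Int) × String) _ =>
      let l' := pvRotate90A s.1
      (l', if l' = l2 then "yes" else s.2)) (l, "no")
  let lf := pvFlipA s1.1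
  let s2 := (PySem.List.pyRange 0 4 1).foldl (fun (s : List (List Int) × String) _ =>
      let l' := pvRotate90A s.1
      (l', if l' = l2 then "yes" else s.2)) (lf, s1.2)
  s2.2

-- ===== PORT B =====
-- the 8 dihedral index transforms of an n×n grid: output cell (i,j) reads source
-- cell t i j (identity, three rotations, flip, and flip composed with rotations)
def pvTransforms (n : Nat) : List (Nat → Nat → Nat × Nat) :=
  [fun i j => (i, j),
   fun i j => (n - 1 - j, i),
   fun i j => (n - 1 - i, n - 1 - j),
   fun i j => (j, n - 1 - i),
   fun i j => (i, n - 1 - j),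
   fun i j => (n - 1 - j, n - 1 - i),
   fun i j => (n - 1 - i, j),
   fun i j => (j, i)]

def check_equivalent_alt (l : List (List Int)) (l2 : List (List Int)) : String :=
  let n := l.length
  if l2.length ≠ n ∨ (∃ row ∈ l2, row.length ≠ n) then "no"
  else if (pvTransforms n).any (fun t =>
      (List.range n).all (fun i => (List.range n).all (fun j =>
        (l2.getD i []).getD j 0 == (l.getD (t i j).1 []).getD (t i j).2 0)))
    then "yes" else "no"

-- ===== PRECONDITION & SPEC =====
-- A raises IndexError exactly when some row of l is shorter than the number of rows
-- (rotate_90 reads a[y][x] for all x, y below len(a)); Pre_ excludes those inputs.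
def Pre_check_equivalent (l : List (List Int)) (l2 : List (List Int)) : Prop :=
  ∀ r ∈ l, l.length ≤ r.length

instance (l : List (List Int)) (l2 : List (List Int)) : Decidable (Pre_check_equivalent l l2) := by
  unfold Pre_check_equivalent; infer_instance

def pvWitness_check_equivalent : List (List Int) × List (List Int) :=
  ([[1, 2], [3, 4]], [[3, 1], [4, 2]])

def Spec_check_equivalent (l : List (List Int)) (l2 : List (List Int)) (out : String) : Prop := out = check_equivalent_alt l l2
instance (l : List (List Int)) (l2 : List (List Int)) (out : String) : Decidable (Spec_check_equivalent l l2 out) := by unfold Spec_check_equivalent; infer_instance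

-- ===== CLAIM (what is proved, stated in full; the proofs are below) =====
def Claim_equal_check_equivalent : Prop := ∀ (l : List (List Int)) (l2 : List (List Int)), Dom_check_equivalent l l2 → Pre_check_equivalent l l2 → Spec_check_equivalent l l2 (check_equivalent l l2)

-- ===== LEMMAS AND PROOFS =====

-- the n×n matrix whose (i,j) entry is g i j
def pvE (g : Nat → Nat → Int) (n : Nat) : List (List Int) :=
  (List.range n).map (fun i => (List.range n).map (fun j => g i j))

lemma pvE_congr (g g' : Nat → Nat → Int) (n : Nat)
    (h : ∀ i < n, ∀ j < n, g i j = g' i j) : pvE g n = pvE g' n := by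
  unfold pvE
  apply List.map_congr_left
  intro i hi
  apply List.map_congr_left
  intro j hj
  exact h i (List.mem_range.mp hi) j (List.mem_range.mp hj)

lemma pvCountdown (n : Nat) : PySem.List.pyRange ((n:Int)-1) (-1) (-1)
    = (List.range n).map (fun (k : Nat) => (n:Int)-1-(k:Int)) := by
  rw [PySem.List.pyRange_neg_one]
  have : ((n:Int) - 1 - -1).toNat = n := by omega
  rw [this]

lemma pvRotate90A_eq (a : List (List Int)) : pvRotate90A a =
    (List.range a.length).map (fun (x : Nat) => (List.range a.length).map (fun (k : Nat) =>
      PySem.List.pyGetD (PySem.List.pyGetD a ((a.length:Int)-1-(k:Int)) []) (x:Int) 0)) := by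
  unfold pvRotate90A
  rw [PySem.List.pyRange_zero_natCast, pvCountdown, List.foldl_map,
    PySem.List.foldl_append_singleton_eq_map]
  simp only [List.nil_append]
  apply List.map_congr_left
  intro x hx
  rw [List.foldl_map, PySem.List.foldl_append_singleton_eq_map]
  simp

lemma pvFlipA_eq (a : List (List Int)) : pvFlipA a =
    (List.range a.length).map (fun (x : Nat) => (List.range a.length).map (fun (k : Nat) =>
      PySem.List.pyGetD (PySem.List.pyGetD a (x:Int) []) ((a.length:Int)-1-(k:Int)) 0)) := by
  unfold pvFlipA
  rw [PySem.List.pyRange_zero_natCast, pvCountdown, List.foldl_map,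
    PySem.List.foldl_append_singleton_eq_map]
  simp only [List.nil_append]
  apply List.map_congr_left
  intro x hx
  rw [List.foldl_map, PySem.List.foldl_append_singleton_eq_map]
  simp

lemma pvGetE (g : Nat → Nat → Int) (n i j : Nat) (hi : i < n) (hj : j < n) :
    PySem.List.pyGetD (PySem.List.pyGetD (pvE g n) (i:Int) []) (j:Int) 0 = g i j := by
  rw [PySem.List.pyGetD_natCast, PySem.List.pyGetD_natCast]
  have h1 : (pvE g n).getD i [] = (List.range n).map (fun j => g i j) := by
    unfold pvE
    rw [List.getD_eq_getElem _ _ (by simpa using hi)]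
    simp
  rw [h1, List.getD_eq_getElem _ _ (by simpa using hj)]
  simp

lemma pvE_length (g : Nat → Nat → Int) (n : Nat) : (pvE g n).length = n := by simp [pvE]

-- rotating the explicit matrix composes the coordinate map with one 90° turn
lemma pvRotE (g : Nat → Nat → Int) (n : Nat) :
    pvRotate90A (pvE g n) = pvE (fun i j => g (n - 1 - j) i) n := by
  rw [pvRotate90A_eq, pvE_length]
  conv_rhs => unfold pvE
  apply List.map_congr_left
  intro x hx
  apply List.map_congr_left
  intro k hk
  have hk' : k < n := List.mem_range.mp hk
  have hx' : x < n := List.mem_range.mp hx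
  have hc : ((n:Int) - 1 - (k:Int)) = ((n - 1 - k : Nat) : Int) := by omega
  rw [hc, pvGetE g n (n-1-k) x (by omega) hx']

lemma pvFlipE (g : Nat → Nat → Int) (n : Nat) :
    pvFlipA (pvE g n) = pvE (fun i j => g i (n - 1 - j)) n := by
  rw [pvFlipA_eq, pvE_length]
  conv_rhs => unfold pvE
  apply List.map_congr_left
  intro x hx
  apply List.map_congr_left
  intro k hk
  have hk' : k < n := List.mem_range.mp hk
  have hx' : x < n := List.mem_range.mp hx
  have hc : ((n:Int) - 1 - (k:Int)) = ((n - 1 - k : Nat) : Int) := by omega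
  rw [hc, pvGetE g n x (n-1-k) hx' (by omega)]

-- the first rotation of l itself is an explicit matrix over l's top-left block
lemma pvRotBase (l : List (List Int)) :
    pvRotate90A l = pvE (fun i j => (l.getD (l.length - 1 - j) []).getD i 0) l.length := by
  rw [pvRotate90A_eq]
  unfold pvE
  apply List.map_congr_left
  intro x hx
  apply List.map_congr_left
  intro k hk
  have hk' : k < l.length := List.mem_range.mp hk
  have hc : ((l.length:Int) - 1 - (k:Int)) = ((l.length - 1 - k : Nat) : Int) := by omega
  rw [hc]
  simp [PySem.List.pyGetD_natCast]

-- A's rotate-and-compare loop: k turns, flag set iff some intermediate equals l2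
def pvRotN : Nat → List (List Int) → List (List Int)
  | 0, a => a
  | k+1, a => pvRotN k (pvRotate90A a)

lemma pvLoopA (l2 : List (List Int)) (ks : List Int) (a : List (List Int)) (d : String) :
    ks.foldl (fun (s : List (List Int) × String) _ =>
      let l' := pvRotate90A s.1
      (l', if l' = l2 then "yes" else s.2)) (a, d)
    = (pvRotN ks.length a,
       if ∃ k < ks.length, pvRotN (k+1) a = l2 then "yes" else d) := by
  induction ks generalizing a d with
  | nil => simp [pvRotN]
  | cons k ks ih =>
    simp only [List.foldl_cons, List.length_cons]
    rw [ih]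
    rw [Prod.mk.injEq]
    refine ⟨rfl, ?_⟩
    by_cases h0 : pvRotate90A a = l2
    · have hall : ∃ k < ks.length + 1, pvRotN (k+1) a = l2 := ⟨0, by omega, h0⟩
      rw [if_pos hall]
      by_cases hrest : ∃ j < ks.length, pvRotN (j+1) (pvRotate90A a) = l2 <;>
        simp [h0]
    · by_cases hrest : ∃ j < ks.length, pvRotN (j+1) (pvRotate90A a) = l2
      · obtain ⟨j, hj, hjv⟩ := hrest
        have hall : ∃ k < ks.length + 1, pvRotN (k+1) a = l2 := ⟨j+1, by omega, hjv⟩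
        rw [if_pos hall, if_pos ⟨j, hj, hjv⟩]
      · have hno : ¬ ∃ k < ks.length + 1, pvRotN (k+1) a = l2 := by
          rintro ⟨k, hk, hkv⟩
          match k, hkv with
          | 0, hkv => exact h0 hkv
          | (j+1), hkv => exact hrest ⟨j, by omega, hkv⟩
        rw [if_neg hno, if_neg hrest, if_neg h0]

lemma pvRotN_succ (k : Nat) (a : List (List Int)) :
    pvRotN (k+1) a = pvRotate90A (pvRotN k a) := by
  induction k generalizing a with
  | zero => rfl
  | succ k ih =>
    have h : pvRotN (k+1+1) a = pvRotN (k+1) (pvRotate90A a) := rfl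
    rw [h, ih]
    rfl

lemma pvEx4 (P : Nat → Prop) : (∃ k < 4, P k) ↔ P 0 ∨ P 1 ∨ P 2 ∨ P 3 := by
  constructor
  · rintro ⟨k, hk, h⟩
    interval_cases k <;> tauto
  · rintro (h|h|h|h)
    exacts [⟨0, by omega, h⟩, ⟨1, by omega, h⟩, ⟨2, by omega, h⟩, ⟨3, by omega, h⟩]

-- l2 equals the explicit matrix iff it has the right shape and matches pointwise
lemma pvEqE (l2 : List (List Int)) (g : Nat → Nat → Int) (n : Nat) :
    l2 = pvE g n ↔
      (l2.length = n ∧ (∀ row ∈ l2, row.length = n)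
        ∧ ∀ i < n, ∀ j < n, (l2.getD i []).getD j 0 = g i j) := by
  constructor
  · rintro rfl
    refine ⟨pvE_length g n, ?_, ?_⟩
    · intro row hrow
      unfold pvE at hrow
      simp only [List.mem_map, List.mem_range] at hrow
      obtain ⟨i, -, rfl⟩ := hrow
      simp
    · intro i hi j hj
      have := pvGetE g n i j hi hj
      simpa [PySem.List.pyGetD_natCast] using this
  · rintro ⟨hlen, hrows, hpt⟩
    apply List.ext_getElem
    · simp [pvE, hlen]
    intro i hi1 hi2
    have hin : i < n := by simpa [pvE] using hi2
    have hrowlen : l2[i].length = n := hrows _ (List.getElem_mem hi1)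
    apply List.ext_getElem
    · simp [pvE, hrowlen]
    intro j hj1 hj2
    have hjn : j < n := by omega
    have := hpt i hin j hjn
    rw [List.getD_eq_getElem _ _ hi1, List.getD_eq_getElem _ _ hj1] at this
    simpa [pvE] using this

lemma pvIfOr (P Q : Prop) [Decidable P] [Decidable Q] :
    (if Q then "yes" else if P then "yes" else "no")
      = if P ∨ Q then "yes" else "no" := by
  split_ifs <;> tauto

-- B answers "yes" iff l2 equals one of the 8 explicit images of l's top-left block
lemma pvAltEq (l l2 : List (List Int)) :
    check_equivalent_alt l l2 =
      if ∃ t ∈ pvTransforms l.length,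
          l2 = pvE (fun i j => ((l.getD (t i j).1 []).getD (t i j).2 0)) l.length
        then "yes" else "no" := by
  unfold check_equivalent_alt
  simp only
  by_cases hsh : l2.length = l.length ∧ ∀ row ∈ l2, row.length = l.length
  · rw [if_neg (by rintro (h | ⟨r, hr, hne⟩); exacts [h hsh.1, hne (hsh.2 r hr)])]
    apply if_congr _ rfl rfl
    simp only [List.any_eq_true, List.all_eq_true, List.mem_range, beq_iff_eq]
    constructor
    · rintro ⟨t, ht, hpt⟩
      exact ⟨t, ht, (pvEqE l2 _ l.length).mpr ⟨hsh.1, hsh.2, fun i hi j hj => hpt i hi j hj⟩⟩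
    · rintro ⟨t, ht, heq⟩
      obtain ⟨-, -, hpt⟩ := (pvEqE l2 _ l.length).mp heq
      exact ⟨t, ht, fun i hi j hj => hpt i hi j hj⟩
  · have hcond : l2.length ≠ l.length ∨ ∃ row ∈ l2, row.length ≠ l.length := by
      by_cases h1 : l2.length = l.length
      · have h2 : ¬ ∀ row ∈ l2, row.length = l.length := fun hall => hsh ⟨h1, hall⟩
        simp only [not_forall, exists_prop] at h2
        exact Or.inr h2
      · exact Or.inl h1
    rw [if_pos hcond, if_neg]
    rintro ⟨t, ht, heq⟩
    obtain ⟨h1, h2, -⟩ := (pvEqE l2 _ l.length).mp heq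
    exact hsh ⟨h1, h2⟩

set_option maxHeartbeats 2000000 in
lemma pvMain (l l2 : List (List Int)) :
    check_equivalent l l2 = check_equivalent_alt l l2 := by
  unfold check_equivalent
  simp only [pvLoopA]
  set n := l.length with hn
  set g0 : Nat → Nat → Int := fun i j => (l.getD i []).getD j 0 with hg0
  have hlen : (PySem.List.pyRange 0 4 1).length = 4 := by
    simp [PySem.List.pyRange]
  rw [hlen]
  have e1 : pvRotN 1 l = pvE (fun i j => g0 (n - 1 - j) i) n := pvRotBase l
  have e2 : pvRotN 2 l = pvE (fun i j => g0 (n - 1 - i) (n - 1 - j)) n := by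
    rw [show pvRotN 2 l = pvRotate90A (pvRotN 1 l) from pvRotN_succ 1 l, e1, pvRotE]
  have e3 : pvRotN 3 l = pvE (fun i j => g0 j (n - 1 - i)) n := by
    rw [show pvRotN 3 l = pvRotate90A (pvRotN 2 l) from pvRotN_succ 2 l, e2, pvRotE]
    exact pvE_congr _ _ n (fun i hi j hj => by
      show g0 (n - 1 - (n - 1 - j)) (n - 1 - i) = g0 j (n - 1 - i)
      rw [show n - 1 - (n - 1 - j) = j by omega])
  have e4 : pvRotN 4 l = pvE (fun i j => g0 i j) n := by
    rw [show pvRotN 4 l = pvRotate90A (pvRotN 3 l) from pvRotN_succ 3 l, e3, pvRotE]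
    exact pvE_congr _ _ n (fun i hi j hj => by
      show g0 i (n - 1 - (n - 1 - j)) = g0 i j
      rw [show n - 1 - (n - 1 - j) = j by omega])
  have ef : pvFlipA (pvRotN 4 l) = pvE (fun i j => g0 i (n - 1 - j)) n := by
    rw [e4, pvFlipE]
  rw [ef]
  have f1 : pvRotN 1 (pvE (fun i j => g0 i (n - 1 - j)) n)
      = pvE (fun i j => g0 (n - 1 - j) (n - 1 - i)) n := pvRotE _ n
  have f2 : pvRotN 2 (pvE (fun i j => g0 i (n - 1 - j)) n)
      = pvE (fun i j => g0 (n - 1 - i) j) n := by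
    rw [show pvRotN 2 (pvE (fun i j => g0 i (n - 1 - j)) n) = pvRotate90A (pvRotN 1 (pvE (fun i j => g0 i (n - 1 - j)) n)) from pvRotN_succ 1 _, f1, pvRotE]
    exact pvE_congr _ _ n (fun i hi j hj => by
      show g0 (n - 1 - i) (n - 1 - (n - 1 - j)) = g0 (n - 1 - i) j
      rw [show n - 1 - (n - 1 - j) = j by omega])
  have f3 : pvRotN 3 (pvE (fun i j => g0 i (n - 1 - j)) n)
      = pvE (fun i j => g0 j i) n := by
    rw [show pvRotN 3 (pvE (fun i j => g0 i (n - 1 - j)) n) = pvRotate90A (pvRotN 2 (pvE (fun i j => g0 i (n - 1 - j)) n)) from pvRotN_succ 2 _, f2, pvRotE]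
    exact pvE_congr _ _ n (fun i hi j hj => by
      show g0 (n - 1 - (n - 1 - j)) i = g0 j i
      rw [show n - 1 - (n - 1 - j) = j by omega])
  have f4 : pvRotN 4 (pvE (fun i j => g0 i (n - 1 - j)) n)
      = pvE (fun i j => g0 i (n - 1 - j)) n := by
    rw [show pvRotN 4 (pvE (fun i j => g0 i (n - 1 - j)) n) = pvRotate90A (pvRotN 3 (pvE (fun i j => g0 i (n - 1 - j)) n)) from pvRotN_succ 3 _, f3, pvRotE]
  rw [pvIfOr, pvAltEq l l2]
  apply if_congr _ rfl rfl
  rw [pvEx4, pvEx4]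
  simp only [Nat.reduceAdd, e1, e2, e3, e4, f1, f2, f3, f4]
  have hB : (∃ t ∈ pvTransforms n,
        l2 = pvE (fun i j => ((l.getD (t i j).1 []).getD (t i j).2 0)) n) ↔
      (l2 = pvE (fun i j => g0 i j) n ∨ l2 = pvE (fun i j => g0 (n - 1 - j) i) n ∨
       l2 = pvE (fun i j => g0 (n - 1 - i) (n - 1 - j)) n ∨
       l2 = pvE (fun i j => g0 j (n - 1 - i)) n ∨
       l2 = pvE (fun i j => g0 i (n - 1 - j)) n ∨
       l2 = pvE (fun i j => g0 (n - 1 - j) (n - 1 - i)) n ∨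
       l2 = pvE (fun i j => g0 (n - 1 - i) j) n ∨ l2 = pvE (fun i j => g0 j i) n) := by
    rw [hg0]
    simp only [pvTransforms, List.mem_cons, List.not_mem_nil, or_false,
      exists_eq_or_imp, exists_eq_left]
  rw [hB]
  constructor
  · rintro ((h|h|h|h)|(h|h|h|h))
    exacts [Or.inr (Or.inl h.symm),
      Or.inr (Or.inr (Or.inl h.symm)),
      Or.inr (Or.inr (Or.inr (Or.inl h.symm))),
      Or.inl h.symm,
      Or.inr (Or.inr (Or.inr (Or.inr (Or.inr (Or.inl h.symm))))),
      Or.inr (Or.inr (Or.inr (Or.inr (Or.inr (Or.inr (Or.inl h.symm)))))),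
      Or.inr (Or.inr (Or.inr (Or.inr (Or.inr (Or.inr (Or.inr h.symm)))))),
      Or.inr (Or.inr (Or.inr (Or.inr (Or.inl h.symm))))]
  · rintro (h|h|h|h|h|h|h|h)
    exacts [Or.inl (Or.inr (Or.inr (Or.inr h.symm))),
      Or.inl (Or.inl h.symm),
      Or.inl (Or.inr (Or.inl h.symm)),
      Or.inl (Or.inr (Or.inr (Or.inl h.symm))),
      Or.inr (Or.inr (Or.inr (Or.inr h.symm))),
      Or.inr (Or.inl h.symm),
      Or.inr (Or.inr (Or.inl h.symm)),
      Or.inr (Or.inr (Or.inr (Or.inl h.symm)))]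

-- ===== VERDICT (by name: the statement is the Claim_ definition above) =====
theorem check_equivalent_spec : Claim_equal_check_equivalent := by
  intro l l2 _ _
  unfold Spec_check_equivalent
  exact pvMain l l2
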